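-- pv_equiv track=rewrite | github.com/Truth09/Lab-3 | Function1.py | contains_007
-- ===== SOURCE A (Python) =====
-- def contains_007(numbers):
--     z=0
--
--     for num in numbers:
--         if num == 0:
--             z += 1
--         elif num == 7 and z>=2:
--             return True
--
--     return False
-- ===== SOURCE B (Python) =====
-- def contains_007(numbers):
--     nums = list(numbers)
--     zeros = [i for i, x in enumerate(nums) if x == 0]
--     if len(zeros) < 2:
--         return False
--     return 7 in nums[zeros[1] + 1:]
-- ===== Notes on version B (the rewrite author's own statement) =====
-- stated objective: alternative
-- what changed: Replaces A's single stateful scan (zero counter with early return) by an index-based decomposition: collect the indices of zeros, then test membership of 7 in the suffix strictly after the second zero.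
import Mathlib
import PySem

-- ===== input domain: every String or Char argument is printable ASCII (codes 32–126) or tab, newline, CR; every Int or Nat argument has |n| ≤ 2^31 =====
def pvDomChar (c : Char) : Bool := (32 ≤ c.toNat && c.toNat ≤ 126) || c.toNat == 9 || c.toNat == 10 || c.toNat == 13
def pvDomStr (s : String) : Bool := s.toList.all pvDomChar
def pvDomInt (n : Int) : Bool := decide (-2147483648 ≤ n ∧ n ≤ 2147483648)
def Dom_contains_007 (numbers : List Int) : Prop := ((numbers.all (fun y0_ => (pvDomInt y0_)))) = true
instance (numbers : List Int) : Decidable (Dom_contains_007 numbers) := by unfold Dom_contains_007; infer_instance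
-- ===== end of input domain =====

-- B replaces A's stateful counting scan by collecting zero indices and testing 7 in the suffix after the second zero (alternative decomposition, same cost).

-- ===== PORT A =====
-- the for-loop with counter z and early return
def goA_contains_007 (z : Int) : List Int → Bool
  | [] => false
  | num :: rest =>
    if num = 0 then goA_contains_007 (z + 1) rest
    else if num = 7 ∧ 2 ≤ z then true
    else goA_contains_007 z rest

def contains_007 (numbers : List Int) : Bool := goA_contains_007 0 numbers

-- ===== PORT B =====
-- the comprehension [i for i, x in enumerate(nums) if x == 0], with enumerate counter i
def zeroIdxs (i : Nat) : List Int → List Nat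
  | [] => []
  | x :: rest => if x = 0 then i :: zeroIdxs (i + 1) rest else zeroIdxs (i + 1) rest

def contains_007_alt (numbers : List Int) : Bool :=
  match zeroIdxs 0 numbers with
  | _ :: i :: _ => (numbers.drop (i + 1)).contains 7   -- 7 in nums[zeros[1]+1:]
  | _ => false                                          -- len(zeros) < 2

-- ===== PRECONDITION & SPEC =====
def Spec_contains_007 (numbers : List Int) (out : Bool) : Prop := out = contains_007_alt numbers
instance (numbers : List Int) (out : Bool) : Decidable (Spec_contains_007 numbers out) := by unfold Spec_contains_007; infer_instance

-- ===== CLAIM (what is proved, stated in full; the proofs are below) =====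
def Claim_equal_contains_007 : Prop := ∀ (numbers : List Int), Dom_contains_007 numbers → Spec_contains_007 numbers (contains_007 numbers)

-- ===== LEMMAS AND PROOFS =====

theorem zeroIdxs_shift (l : List Int) : ∀ (i : Nat), zeroIdxs (i + 1) l = (zeroIdxs i l).map (· + 1) := by
  induction l with
  | nil => intro i; simp [zeroIdxs]
  | cons x rest ih =>
    intro i
    simp only [zeroIdxs]
    split_ifs with h
    · simp [ih (i + 1)]
    · simp [ih (i + 1)]

theorem goA_ge2 (l : List Int) : ∀ (z : Int), 2 ≤ z → goA_contains_007 z l = l.contains 7 := by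
  induction l with
  | nil => intro z _; simp [goA_contains_007]
  | cons n rest ih =>
    intro z hz
    simp only [goA_contains_007, List.contains_cons]
    by_cases h0 : n = 0
    · subst h0
      rw [ih (z + 1) (by omega)]
      simp
    · by_cases h7 : n = 7
      · subst h7; simp [h0, hz]
      · rw [if_neg h0, if_neg (by tauto), ih z hz]
        have : (7 : Int) ≠ n := fun h => h7 h.symm
        simp [this]

theorem goA_main (l : List Int) :
    (goA_contains_007 0 l = (match zeroIdxs 0 l with
      | _ :: i :: _ => (l.drop (i + 1)).contains 7
      | _ => false))
    ∧ (goA_contains_007 1 l = (match zeroIdxs 0 l with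
      | i :: _ => (l.drop (i + 1)).contains 7
      | _ => false)) := by
  induction l with
  | nil => exact ⟨rfl, rfl⟩
  | cons x rest ih =>
    obtain ⟨ih0, ih1⟩ := ih
    constructor
    · -- state z = 0
      simp only [goA_contains_007, zeroIdxs]
      by_cases h0 : x = 0
      · rw [if_pos h0, if_pos h0]
        simp only [zero_add]
        rw [ih1, zeroIdxs_shift]
        cases hz : zeroIdxs 0 rest with
        | nil => simp
        | cons j js => simp [List.drop_succ_cons]
      · rw [if_neg h0, if_neg (by omega : ¬ (x = 7 ∧ (2:Int) ≤ 0)), if_neg h0]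
        simp only [zero_add]
        rw [ih0, zeroIdxs_shift]
        cases hz : zeroIdxs 0 rest with
        | nil => simp
        | cons j js =>
          cases js with
          | nil => simp
          | cons k ks => simp [List.drop_succ_cons]
    · -- state z = 1
      simp only [goA_contains_007, zeroIdxs]
      by_cases h0 : x = 0
      · rw [if_pos h0, if_pos h0, goA_ge2 rest (1 + 1) (by omega)]
        simp [List.drop_succ_cons]
      · rw [if_neg h0, if_neg (by omega : ¬ (x = 7 ∧ (2:Int) ≤ 1)), if_neg h0]
        simp only [zero_add]
        rw [ih1, zeroIdxs_shift]
        cases hz : zeroIdxs 0 rest with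
        | nil => simp
        | cons j js => simp [List.drop_succ_cons]

-- ===== VERDICT (by name: the statement is the Claim_ definition above) =====
theorem contains_007_spec : Claim_equal_contains_007 := by
  intro numbers _
  unfold Spec_contains_007 contains_007 contains_007_alt
  exact (goA_main numbers).1
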